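-- pv_equiv track=rewrite | github.com/sandialabs/ChemicalAssetTracker | Scripts/import_ghs.py | parse_chemical_names
-- ===== SOURCE A (Python) =====
-- def parse_chemical_names(names):
--     nlist = []
--     l1 = names.split('\n')
--     for n1 in l1:
--         n1 = n1.strip()
--         if len(n1) > 0:
--             l2 = n1.split(';')
--             for n2 in l2:
--                 n2 = n2.strip()
--                 if len(n2) > 0:
--                     nlist.append(n2)
--     return ';'.join(nlist)
-- ===== SOURCE B (Python) =====
-- def parse_chemical_names(names):
--     # Single character-level scan: no split() at all.  Tokens are built directly,
--     # whitespace between word characters is buffered so trailing whitespace is dropped.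
--     out = []
--     token = []   # current token, no leading whitespace, ends in a non-space char
--     ws = []      # buffered whitespace seen after token's last non-space char
--     for ch in names:
--         if ch == '\n' or ch == ';':
--             if token:
--                 out.append(''.join(token))
--             token = []
--             ws = []
--         elif ch.isspace():
--             if token:
--                 ws.append(ch)
--         else:
--             if ws:
--                 token.extend(ws)
--                 ws = []
--             token.append(ch)
--     if token:
--         out.append(''.join(token))
--     return ';'.join(out)
-- ===== Notes on version B (the rewrite author's own statement) =====
-- stated objective: alternative
-- what changed: B replaces A's two-level split/strip/filter passes with a single character-by-character state-machine scan (current token + buffered whitespace accumulator) that never calls split or strip.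
import Mathlib
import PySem

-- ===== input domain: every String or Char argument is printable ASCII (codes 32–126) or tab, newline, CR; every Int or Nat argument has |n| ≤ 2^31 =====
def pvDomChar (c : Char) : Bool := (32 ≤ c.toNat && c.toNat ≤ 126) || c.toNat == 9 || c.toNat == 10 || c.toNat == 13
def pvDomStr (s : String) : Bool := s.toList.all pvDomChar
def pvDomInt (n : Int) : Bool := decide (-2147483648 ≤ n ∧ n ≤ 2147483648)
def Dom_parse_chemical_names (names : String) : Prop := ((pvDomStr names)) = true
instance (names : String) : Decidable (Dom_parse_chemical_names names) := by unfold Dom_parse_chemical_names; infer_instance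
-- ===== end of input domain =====

-- B replaces A's two-level split/strip/filter passes with a single character-by-character
-- state-machine scan (current token + buffered whitespace), never calling split or strip.

-- ===== PORT A =====
def parse_chemical_names (names : String) : String :=
  let l1 := PySem.Chars.splitOn names.toList ['\n']
  let nlist := l1.foldl (fun nlist n1 =>
    let n1' := PySem.Chars.strip n1
    if 0 < n1'.length then
      (PySem.Chars.splitOn n1' [';']).foldl (fun nlist n2 =>
        let n2' := PySem.Chars.strip n2
        if 0 < n2'.length then nlist ++ [n2'] else nlist) nlist
    else nlist) []
  String.ofList (PySem.Chars.join [';'] nlist)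

-- ===== PORT B =====
-- loop body of Source B: state = (out, token, ws)
def pcnStep (st : List (List Char) × List Char × List Char) (c : Char) :
    List (List Char) × List Char × List Char :=
  if c = '\n' ∨ c = ';' then
    ((if st.2.1 ≠ [] then st.1 ++ [st.2.1] else st.1), [], [])
  else if PySem.Chars.isspace c then
    (st.1, st.2.1, if st.2.1 ≠ [] then st.2.2 ++ [c] else st.2.2)
  else
    (st.1, st.2.1 ++ st.2.2 ++ [c], [])

def parse_chemical_names_alt (names : String) : String :=
  let st := names.toList.foldl pcnStep ([], [], [])
  String.ofList (PySem.Chars.join [';']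
    (st.1 ++ (if st.2.1 ≠ [] then [st.2.1] else [])))

-- ===== PRECONDITION & SPEC =====
def Spec_parse_chemical_names (names : String) (out : String) : Prop := out = parse_chemical_names_alt names
instance (names : String) (out : String) : Decidable (Spec_parse_chemical_names names out) := by unfold Spec_parse_chemical_names; infer_instance

-- ===== CLAIM (what is proved, stated in full; the proofs are below) =====
def Claim_equal_parse_chemical_names : Prop := ∀ (names : String), Dom_parse_chemical_names names → Spec_parse_chemical_names names (parse_chemical_names names)

-- ===== LEMMAS AND PROOFS =====

-- simple single-char splitter
def splitC (c : Char) : List Char → List (List Char)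
  | [] => [[]]
  | a :: s =>
    if a = c then [] :: splitC c s
    else match splitC c s with
      | [] => [[a]]
      | t :: r => (a :: t) :: r

theorem splitC_ne_nil (c : Char) (s : List Char) : splitC c s ≠ [] := by
  induction s with
  | nil => simp [splitC]
  | cons a s ih =>
    simp only [splitC]
    split_ifs
    · simp
    · cases h : splitC c s <;> simp

def consH (p : List Char) : List (List Char) → List (List Char)
  | [] => [p]
  | t :: r => (p ++ t) :: r

theorem splitC_cons_ne (c a : Char) (s : List Char) (h : a ≠ c) :
    splitC c (a :: s) = consH [a] (splitC c s) := by
  simp only [splitC, if_neg h]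
  cases hs : splitC c s with
  | nil => exact absurd hs (splitC_ne_nil c s)
  | cons t r => simp [consH]

theorem go_eq (c : Char) (fuel : Nat) (l cur : List Char) (acc : List (List Char))
    (h : l.length ≤ fuel) :
    PySem.Chars.splitOn.go [c] fuel l cur acc = acc.reverse ++ consH cur.reverse (splitC c l) := by
  induction fuel generalizing l cur acc with
  | zero =>
    have : l = [] := List.length_eq_zero_iff.mp (Nat.le_zero.mp h)
    subst this
    simp [PySem.Chars.splitOn.go, splitC, consH]
  | succ f ih =>
    cases l with
    | nil => simp [PySem.Chars.splitOn.go, splitC, consH]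
    | cons a rest =>
      by_cases hac : a = c
      · subst hac
        have hp : List.isPrefixOf [a] (a :: rest) = true := by
          simp [List.isPrefixOf]
        rw [PySem.Chars.splitOn.go]
        simp only [hp, if_true, List.length_cons, List.length_nil, List.drop_succ_cons, List.drop_zero]
        rw [ih rest [] (cur.reverse :: acc) (by simpa using Nat.le_of_succ_le_succ h)]
        simp only [splitC, List.reverse_cons, List.append_assoc]
        cases hs : splitC a rest with
        | nil => exact absurd hs (splitC_ne_nil a rest)
        | cons t r => simp [consH]
      · have hp : List.isPrefixOf [c] (a :: rest) = false := by
          simp [List.isPrefixOf]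
          intro hh; exact hac hh.symm
        rw [PySem.Chars.splitOn.go]
        simp only [hp]
        rw [if_neg (by simp)]
        rw [ih rest (a :: cur) acc (by simpa using Nat.le_of_succ_le_succ h)]
        rw [splitC_cons_ne c a rest hac]
        cases hs : splitC c rest with
        | nil => exact absurd hs (splitC_ne_nil c rest)
        | cons t r => simp [consH]

theorem splitOn_eq_splitC (c : Char) (s : List Char) :
    PySem.Chars.splitOn s [c] = splitC c s := by
  rw [PySem.Chars.splitOn, go_eq c (s.length + 1) s [] [] (by omega)]
  cases hs : splitC c s with
  | nil => exact absurd hs (splitC_ne_nil c s)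
  | cons t r => simp [consH]

-- splitting the '\n'→';' normalized string = flatMap of the two-level split
theorem splitC_map_norm (s : List Char) :
    splitC ';' (s.map (fun a => if a = '\n' then ';' else a))
      = (splitC '\n' s).flatMap (fun t => splitC ';' t) := by
  induction s with
  | nil => simp [splitC]
  | cons a s ih =>
    by_cases h1 : a = '\n'
    · subst h1
      simp only [List.map_cons, splitC, ih]
      simp [splitC]
    · obtain ⟨t, r, hs⟩ : ∃ t r, splitC '\n' s = t :: r := by
        cases hs : splitC '\n' s with
        | nil => exact absurd hs (splitC_ne_nil _ _)
        | cons t r => exact ⟨t, r, rfl⟩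
      have hflat : splitC ';' (s.map (fun a => if a = '\n' then ';' else a))
          = splitC ';' t ++ r.flatMap (fun t => splitC ';' t) := by
        rw [ih, hs]; simp
      rw [splitC_cons_ne '\n' a s h1, hs]
      by_cases h2 : a = ';'
      · subst h2
        simp only [List.map_cons, if_neg h1, splitC, hflat, consH]
        simp [splitC]
      · simp only [List.map_cons, if_neg h1]
        rw [splitC_cons_ne ';' a _ h2, hflat]
        obtain ⟨u, v, ht⟩ : ∃ u v, splitC ';' t = u :: v := by
          cases ht : splitC ';' t with
          | nil => exact absurd ht (splitC_ne_nil _ _)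
          | cons u v => exact ⟨u, v, rfl⟩
        simp only [consH, List.flatMap_cons]
        rw [show ([a] ++ t) = a :: t from rfl, splitC_cons_ne ';' a t h2, ht]
        rfl

-- strip facts
theorem strip_cons_space (a : Char) (t : List Char) (h : PySem.Chars.isspace a = true) :
    PySem.Chars.strip (a :: t) = PySem.Chars.strip t := by
  simp [PySem.Chars.strip, PySem.Chars.lstrip, h]

theorem strip_snoc_space (a : Char) (t : List Char) (h : PySem.Chars.isspace a = true) :
    PySem.Chars.strip (t ++ [a]) = PySem.Chars.strip t := by
  simp only [PySem.Chars.strip, PySem.Chars.lstrip, PySem.Chars.rstrip, List.dropWhile_append]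
  by_cases hd : (List.dropWhile PySem.Chars.isspace t).isEmpty
  · have he : List.dropWhile PySem.Chars.isspace t = [] := List.isEmpty_iff.mp hd
    simp [he, h]
  · simp [hd, h]

theorem strip_length_pos_ne_nil (x : List Char) : (0 < (PySem.Chars.strip x).length) ↔ PySem.Chars.strip x ≠ [] := by
  cases PySem.Chars.strip x <;> simp

def modLast (f : List Char → List Char) : List (List Char) → List (List Char)
  | [] => []
  | [x] => [f x]
  | x :: xs => x :: modLast f xs

theorem splitC_snoc_ne (c a : Char) (l : List Char) (h : a ≠ c) :
    splitC c (l ++ [a]) = modLast (· ++ [a]) (splitC c l) := by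
  induction l with
  | nil =>
    simp only [List.nil_append, splitC, if_neg h, modLast]
  | cons b l ih =>
    by_cases hb : b = c
    · subst hb
      simp only [List.cons_append, splitC, ih]
      cases hs : splitC b l with
      | nil => exact absurd hs (splitC_ne_nil _ _)
      | cons t r => simp [modLast]
    · rw [List.cons_append, splitC_cons_ne c b _ hb, splitC_cons_ne c b _ hb, ih]
      cases hs : splitC c l with
      | nil => exact absurd hs (splitC_ne_nil _ _)
      | cons t r =>
        cases r with
        | nil => simp [modLast, consH]
        | cons t2 r2 => simp [modLast, consH]

theorem map_strip_modLast_snoc (a : Char) (h : PySem.Chars.isspace a = true)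
    (xs : List (List Char)) :
    xs.map (fun x => PySem.Chars.strip x) = (modLast (· ++ [a]) xs).map (fun x => PySem.Chars.strip x) := by
  induction xs with
  | nil => rfl
  | cons x xs ih =>
    cases xs with
    | nil => simp [modLast, strip_snoc_space a x h]
    | cons y ys => simpa [modLast] using ih

theorem map_strip_splitC_prefix (w l : List Char) (hw : ∀ a ∈ w, PySem.Chars.isspace a = true) :
    ((splitC ';' (w ++ l)).map fun x => PySem.Chars.strip x)
      = (splitC ';' l).map fun x => PySem.Chars.strip x := by
  induction w with
  | nil => rfl
  | cons a w ih =>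
    have ha : PySem.Chars.isspace a = true := hw a (by simp)
    have hne : a ≠ ';' := by intro hh; rw [hh] at ha; exact absurd ha (by decide)
    rw [List.cons_append, splitC_cons_ne ';' a _ hne]
    cases hs : splitC ';' (w ++ l) with
    | nil => exact absurd hs (splitC_ne_nil _ _)
    | cons t r =>
      have := ih (fun a hm => hw a (by simp [hm]))
      rw [hs] at this
      simp only [consH, List.map_cons] at this ⊢
      rw [show [a] ++ t = a :: t from rfl, strip_cons_space a t ha]
      exact this

theorem map_strip_splitC_suffix (w l : List Char) (hw : ∀ a ∈ w, PySem.Chars.isspace a = true) :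
    ((splitC ';' (l ++ w)).map fun x => PySem.Chars.strip x)
      = (splitC ';' l).map fun x => PySem.Chars.strip x := by
  induction w generalizing l with
  | nil => simp
  | cons a w ih =>
    have ha : PySem.Chars.isspace a = true := hw a (by simp)
    have hne : a ≠ ';' := by intro hh; rw [hh] at ha; exact absurd ha (by decide)
    have h1 : l ++ a :: w = (l ++ [a]) ++ w := by simp
    rw [h1, ih (l ++ [a]) (fun a hm => hw a (by simp [hm])),
      splitC_snoc_ne ';' a l hne, ← map_strip_modLast_snoc a ha]

theorem map_strip_splitC_strip (t : List Char) :
    ((splitC ';' t).map fun x => PySem.Chars.strip x)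
      = (splitC ';' (PySem.Chars.strip t)).map fun x => PySem.Chars.strip x := by
  have h1 : t = t.takeWhile PySem.Chars.isspace ++ PySem.Chars.lstrip t := by
    simp [PySem.Chars.lstrip]
  have h2 : PySem.Chars.lstrip t
      = PySem.Chars.strip t ++ ((PySem.Chars.lstrip t).reverse.takeWhile PySem.Chars.isspace).reverse := by
    conv_lhs => rw [← List.reverse_reverse (PySem.Chars.lstrip t)]
    conv_lhs => rw [← List.takeWhile_append_dropWhile (p := PySem.Chars.isspace) (l := (PySem.Chars.lstrip t).reverse)]
    rw [List.reverse_append]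
    simp only [PySem.Chars.strip, PySem.Chars.rstrip]
  calc ((splitC ';' t).map fun x => PySem.Chars.strip x)
      = ((splitC ';' (t.takeWhile PySem.Chars.isspace ++ PySem.Chars.lstrip t)).map fun x => PySem.Chars.strip x) := by rw [← h1]
    _ = ((splitC ';' (PySem.Chars.lstrip t)).map fun x => PySem.Chars.strip x) :=
        map_strip_splitC_prefix _ _ (fun a hm => List.mem_takeWhile_imp hm)
    _ = ((splitC ';' (PySem.Chars.strip t ++ ((PySem.Chars.lstrip t).reverse.takeWhile PySem.Chars.isspace).reverse)).map fun x => PySem.Chars.strip x) := by rw [← h2]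
    _ = ((splitC ';' (PySem.Chars.strip t)).map fun x => PySem.Chars.strip x) :=
        map_strip_splitC_suffix _ _ (fun a hm => List.mem_takeWhile_imp (by simpa using hm))

-- per-line contribution (equals [] when the line strips to empty)
def perLine (t : List Char) : List (List Char) :=
  ((splitC ';' (PySem.Chars.strip t)).map (fun x => PySem.Chars.strip x)).filter (fun p => !p.isEmpty)

theorem inner_foldl (ts : List (List Char)) (acc : List (List Char)) :
    ts.foldl (fun nlist n2 =>
        let n2' := PySem.Chars.strip n2
        if 0 < n2'.length then nlist ++ [n2'] else nlist) acc
      = acc ++ (ts.map (fun x => PySem.Chars.strip x)).filter (fun p => !p.isEmpty) := by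
  induction ts generalizing acc with
  | nil => simp
  | cons t ts ih =>
    simp only [List.foldl_cons, List.map_cons, List.filter_cons]
    by_cases h : PySem.Chars.strip t = []
    · simp [h, ih]
    · have hl : 0 < (PySem.Chars.strip t).length := (strip_length_pos_ne_nil t).mpr h
      have hie : (!(PySem.Chars.strip t).isEmpty) = true := by
        simp [h]
      simp only [if_pos hl, hie, ih]
      simp

theorem outer_foldl (lines : List (List Char)) (acc : List (List Char)) :
    lines.foldl (fun nlist n1 =>
        let n1' := PySem.Chars.strip n1
        if 0 < n1'.length then
          (PySem.Chars.splitOn n1' [';']).foldl (fun nlist n2 =>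
            let n2' := PySem.Chars.strip n2
            if 0 < n2'.length then nlist ++ [n2'] else nlist) nlist
        else nlist) acc
      = acc ++ lines.flatMap perLine := by
  induction lines generalizing acc with
  | nil => simp
  | cons t ts ih =>
    simp only [List.foldl_cons, List.flatMap_cons]
    by_cases h : PySem.Chars.strip t = []
    · simp only [ih, perLine, h]
      rw [if_neg (by simp)]
      simp [splitC, show PySem.Chars.strip [] = [] from rfl]
    · have hl : 0 < (PySem.Chars.strip t).length := (strip_length_pos_ne_nil t).mpr h
      rw [ih]
      simp only [if_pos hl, splitOn_eq_splitC, inner_foldl, perLine, List.append_assoc]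

theorem filter_map_strip_flatMap (L : List (List Char)) :
    (((L.flatMap (fun t => splitC ';' t)).map (fun x => PySem.Chars.strip x)).filter (fun p => !p.isEmpty))
      = L.flatMap perLine := by
  induction L with
  | nil => simp
  | cons t L ih =>
    simp only [List.flatMap_cons, List.map_append, List.filter_append, ih]
    congr 1
    rw [map_strip_splitC_strip t]
    rfl

-- ===== B-side lemmas: the scan =====

-- rstrip facts
theorem rstrip_append (x y : List Char) :
    PySem.Chars.rstrip (x ++ y)
      = if PySem.Chars.rstrip y = [] then PySem.Chars.rstrip x else x ++ PySem.Chars.rstrip y := by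
  simp only [PySem.Chars.rstrip, List.reverse_append, List.dropWhile_append]
  by_cases h : (List.dropWhile PySem.Chars.isspace y.reverse).isEmpty
  · have he : List.dropWhile PySem.Chars.isspace y.reverse = [] := List.isEmpty_iff.mp h
    simp [he]
  · have hne : (List.dropWhile PySem.Chars.isspace y.reverse).reverse ≠ [] := by
      simp_all
    simp [h, hne]

theorem rstrip_all_space (w : List Char) (h : ∀ a ∈ w, PySem.Chars.isspace a = true) :
    PySem.Chars.rstrip w = [] := by
  simp only [PySem.Chars.rstrip]
  have : List.dropWhile PySem.Chars.isspace w.reverse = [] := by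
    rw [List.dropWhile_eq_nil_iff]
    intro a ha; exact h a (by simpa using ha)
  simp [this]

theorem rstrip_cons_nonspace (c : Char) (p : List Char) (h : PySem.Chars.isspace c = false) :
    PySem.Chars.rstrip (c :: p) = c :: PySem.Chars.rstrip p := by
  have := rstrip_append [c] p
  rw [show ([c] ++ p) = c :: p from rfl] at this
  rw [this]
  by_cases hp : PySem.Chars.rstrip p = []
  · simp [PySem.Chars.rstrip, h]
  · simp [hp]

theorem strip_cons_nonspace (c : Char) (p : List Char) (h : PySem.Chars.isspace c = false) :
    PySem.Chars.strip (c :: p) = c :: PySem.Chars.rstrip p := by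
  simp only [PySem.Chars.strip, PySem.Chars.lstrip, List.dropWhile, h]
  exact rstrip_cons_nonspace c p h

-- recursive form of Source B's loop + final flush
def goScan (out : List (List Char)) (tok ws : List Char) : List Char → List (List Char)
  | [] => out ++ (if tok ≠ [] then [tok] else [])
  | c :: t =>
    if c = '\n' ∨ c = ';' then goScan (if tok ≠ [] then out ++ [tok] else out) [] [] t
    else if PySem.Chars.isspace c then goScan out tok (if tok ≠ [] then ws ++ [c] else ws) t
    else goScan out (tok ++ ws ++ [c]) [] t

theorem foldl_pcnStep (t : List Char) (out : List (List Char)) (tok ws : List Char) :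
    ((t.foldl pcnStep (out, tok, ws)).1
      ++ (if (t.foldl pcnStep (out, tok, ws)).2.1 ≠ [] then [(t.foldl pcnStep (out, tok, ws)).2.1] else []))
    = goScan out tok ws t := by
  induction t generalizing out tok ws with
  | nil => simp [goScan]
  | cons c t ih =>
    simp only [List.foldl_cons, goScan]
    by_cases hd : c = '\n' ∨ c = ';'
    · rw [if_pos hd, show pcnStep (out, tok, ws) c = ((if tok ≠ [] then out ++ [tok] else out), [], []) by
        simp [pcnStep, hd]]
      exact ih _ _ _
    · by_cases hs : PySem.Chars.isspace c = true
      · rw [if_neg hd, if_pos hs, show pcnStep (out, tok, ws) c = (out, tok, if tok ≠ [] then ws ++ [c] else ws) by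
          simp [pcnStep, hd, hs]]
        exact ih _ _ _
      · rw [if_neg hd, if_neg hs, show pcnStep (out, tok, ws) c = (out, tok ++ ws ++ [c], []) by
          simp [pcnStep, hd, hs]]
        exact ih _ _ _

-- what the scan contributes, expressed through splitC/strip
def scanSpec (tok ws : List Char) (t : List Char) : List (List Char) :=
  match splitC ';' t with
  | [] => []
  | p :: r =>
    (let first := if tok = [] then PySem.Chars.strip p
                  else tok ++ PySem.Chars.rstrip (ws ++ p)
     if first ≠ [] then [first] else []) ++
    ((r.map (fun x => PySem.Chars.strip x)).filter (fun q => !q.isEmpty))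

theorem scanSpec_nil_nil (t : List Char) :
    scanSpec [] [] t = ((splitC ';' t).map (fun x => PySem.Chars.strip x)).filter (fun q => !q.isEmpty) := by
  unfold scanSpec
  cases hs : splitC ';' t with
  | nil => exact absurd hs (splitC_ne_nil _ _)
  | cons p r =>
    simp only [List.map_cons, List.filter_cons]
    by_cases hp : PySem.Chars.strip p = []
    · simp [hp]
    · simp [hp]

theorem goScan_eq (t : List Char) (out : List (List Char)) (tok ws : List Char)
    (hn : '\n' ∉ t)
    (hws : ∀ a ∈ ws, PySem.Chars.isspace a = true)
    (htw : tok = [] → ws = []) :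
    goScan out tok ws t = out ++ scanSpec tok ws t := by
  induction t generalizing out tok ws with
  | nil =>
    have hws0 : PySem.Chars.rstrip ws = [] := rstrip_all_space ws hws
    simp only [goScan, scanSpec, splitC]
    by_cases ht : tok = []
    · simp [ht, show PySem.Chars.strip ([] : List Char) = [] from rfl]
    · simp [ht, hws0]
  | cons c t ih =>
    have hnc : c ≠ '\n' := fun h => hn (h ▸ List.mem_cons_self ..)
    have hnt : '\n' ∉ t := fun h => hn (List.mem_cons_of_mem _ h)
    by_cases hc : c = ';'
    · subst hc
      have hws0 : PySem.Chars.rstrip ws = [] := rstrip_all_space ws hws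
      rw [goScan]
      rw [if_pos (Or.inr rfl)]
      rw [ih _ _ _ hnt (by simp) (fun _ => rfl)]
      have hsplit : splitC ';' (';' :: t) = [] :: splitC ';' t := by
        simp [splitC]
      rw [scanSpec_nil_nil]
      unfold scanSpec
      rw [hsplit]
      by_cases ht : tok = []
      · simp [ht, show PySem.Chars.strip ([] : List Char) = [] from rfl]
      · simp [ht, hws0]
    · obtain ⟨p, r, hs⟩ : ∃ p r, splitC ';' t = p :: r := by
        cases hs : splitC ';' t with
        | nil => exact absurd hs (splitC_ne_nil _ _)
        | cons p r => exact ⟨p, r, rfl⟩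
      have hsplit : splitC ';' (c :: t) = (c :: p) :: r := by
        rw [splitC_cons_ne ';' c t hc, hs]; rfl
      rw [goScan, if_neg (by simp [hnc, hc])]
      by_cases hsp : PySem.Chars.isspace c = true
      · rw [if_pos hsp]
        by_cases ht : tok = []
        · have hwnil : ws = [] := htw ht
          subst ht; subst hwnil
          rw [if_neg (by simp)]
          rw [ih _ _ _ hnt (by simp) (fun _ => rfl)]
          unfold scanSpec
          rw [hsplit, hs]
          simp [strip_cons_space c p hsp]
        · rw [if_pos ht]
          have hws' : ∀ a ∈ ws ++ [c], PySem.Chars.isspace a = true := by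
            intro a ha
            rcases List.mem_append.mp ha with h | h
            · exact hws a h
            · rw [List.mem_singleton.mp h]; exact hsp
          rw [ih _ _ _ hnt hws' (fun h => absurd h ht)]
          unfold scanSpec
          rw [hsplit, hs]
          simp [if_neg ht, List.append_assoc]
      · rw [if_neg hsp]
        have hsp' : PySem.Chars.isspace c = false := by simpa using hsp
        rw [ih _ _ _ hnt (by simp) (by simp)]
        unfold scanSpec
        rw [hsplit, hs]
        by_cases ht : tok = []
        · have hwnil : ws = [] := htw ht
          subst ht; subst hwnil
          simp only [List.nil_append, List.append_nil]
          rw [strip_cons_nonspace c p hsp']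
          simp
        · have hr : PySem.Chars.rstrip (ws ++ c :: p) = ws ++ c :: PySem.Chars.rstrip p := by
            rw [rstrip_append, rstrip_cons_nonspace c p hsp']
            simp
          simp [if_neg ht, hr, List.append_assoc, rstrip_cons_nonspace c p hsp']
  
theorem goScan_norm (t : List Char) (out : List (List Char)) (tok ws : List Char) :
    goScan out tok ws t = goScan out tok ws (t.map (fun a => if a = '\n' then ';' else a)) := by
  induction t generalizing out tok ws with
  | nil => rfl
  | cons c t ih =>
    by_cases hc : c = '\n'
    · subst hc
      rw [List.map_cons, show (if ('\n' : Char) = '\n' then (';' : Char) else '\n') = ';' from if_pos rfl]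
      rw [goScan, goScan, if_pos (Or.inl rfl), if_pos (Or.inr rfl)]
      exact ih _ _ _
    · rw [List.map_cons, show (if c = '\n' then (';' : Char) else c) = c from if_neg hc]
      rw [goScan, goScan]
      by_cases hd : c = '\n' ∨ c = ';'
      · rw [if_pos hd, if_pos hd]; exact ih _ _ _
      · rw [if_neg hd, if_neg hd]
        by_cases hs : PySem.Chars.isspace c = true
        · rw [if_pos hs, if_pos hs]; exact ih _ _ _
        · rw [if_neg hs, if_neg hs]; exact ih _ _ _

theorem newline_not_mem_norm (s : List Char) :
    '\n' ∉ s.map (fun a => if a = '\n' then ';' else a) := by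
  intro h
  obtain ⟨a, _, ha⟩ := List.mem_map.mp h
  by_cases hc : a = '\n' <;> simp [hc] at ha

-- ===== VERDICT (by name: the statement is the Claim_ definition above) =====
theorem parse_chemical_names_spec : Claim_equal_parse_chemical_names := by
  intro names _
  show parse_chemical_names names = parse_chemical_names_alt names
  unfold parse_chemical_names parse_chemical_names_alt
  show String.ofList _ = String.ofList _
  rw [outer_foldl, List.nil_append, splitOn_eq_splitC, foldl_pcnStep,
    goScan_norm, goScan_eq _ _ _ _ (newline_not_mem_norm _) (by simp) (fun _ => rfl),
    List.nil_append, scanSpec_nil_nil, splitC_map_norm, filter_map_strip_flatMap]
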